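-- pv_equiv track=rewrite | github.com/BDuong31/AlphaZero | lib/game/caro/caro_19x19_helpers.py | get_antidiag
-- ===== SOURCE A (Python) =====
-- from typing import List, Tuple
--
-- Matrix = List[List[int]]
--
-- Coord = Tuple[int, int]
--
-- def get_antidiag(matrix: Matrix, coord: Coord) -> List[int]:
--     """Lấy đường chéo phụ (từ dưới-trái lên trên-phải) đi qua tọa độ đã cho.
--
--     Args:
--         matrix (Matrix): Ma trận.
--         coord (Coord): Tọa độ (hàng, cột) cần lấy đường chéo phụ.
--
--     Returns:
--         List[int]: Danh sách các phần tử trên đường chéo phụ.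
--     """
--     assert len(matrix) == len(matrix[0]), "Chúng tôi chỉ xử lý các bảng vuông"
--     row_idx = coord[0]
--     col_idx = coord[1]
--     board_size = len(matrix)
--
--     anti = []
--     # Tìm điểm bắt đầu của đường chéo phụ (ở biên dưới hoặc biên trái)
--     start_row = row_idx + min(board_size - 1 - row_idx, col_idx)
--     start_col = col_idx - min(board_size - 1 - row_idx, col_idx)
--
--     x, y = start_row, start_col
--     while x >= 0 and y < board_size:
--         anti.append(matrix[x][y])
--         x -= 1
--         y += 1
--     return anti
-- ===== SOURCE B (Python) =====
-- def get_antidiag(matrix, coord):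
--     assert len(matrix) == len(matrix[0]), "Chúng tôi chỉ xử lý các bảng vuông"
--     n = len(matrix)
--     s = coord[0] + coord[1]
--     anti = [row[s - i] for i, row in enumerate(matrix) if 0 <= s - i < n]
--     anti.reverse()
--     return anti
-- ===== Notes on version B (the rewrite author's own statement) =====
-- stated objective: simpler
-- what changed: Instead of computing the start corner and walking two pointers (x,y) down the anti-diagonal, B makes one plain pass over all rows, keeping row[s-i] for every row i the anti-diagonal sum s=coord[0]+coord[1] hits (0 <= s-i < n), and reverses the collected list at the end.
import Mathlib
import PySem

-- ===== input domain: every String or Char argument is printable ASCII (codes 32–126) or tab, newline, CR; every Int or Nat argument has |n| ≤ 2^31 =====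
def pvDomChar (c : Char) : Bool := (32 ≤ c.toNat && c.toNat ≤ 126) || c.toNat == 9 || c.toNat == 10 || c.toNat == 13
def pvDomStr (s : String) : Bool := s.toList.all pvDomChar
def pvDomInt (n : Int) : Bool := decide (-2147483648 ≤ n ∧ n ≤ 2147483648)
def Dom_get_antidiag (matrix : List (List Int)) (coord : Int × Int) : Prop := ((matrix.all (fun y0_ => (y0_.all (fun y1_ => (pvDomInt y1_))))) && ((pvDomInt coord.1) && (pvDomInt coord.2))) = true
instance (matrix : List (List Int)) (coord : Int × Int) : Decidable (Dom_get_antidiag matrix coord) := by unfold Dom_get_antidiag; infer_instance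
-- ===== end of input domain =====

-- B replaces A's start-corner computation and two-pointer walk by one plain pass over
-- all rows (keep row[s-i] when the anti-diagonal sum s hits row i) followed by a
-- reverse (simpler decomposition; not faster).

-- ===== PORT A =====
-- while x >= 0 and y < board_size: anti.append(matrix[x][y]); x -= 1; y += 1
-- (indexing via pyGetD with a junk default: Pre_ guarantees every access is in range)
def pvLoopA (matrix : List (List Int)) (n x y : Int) : List Int :=
  if _h : 0 ≤ x ∧ y < n then
    PySem.List.pyGetD (PySem.List.pyGetD matrix x []) y 0 :: pvLoopA matrix n (x - 1) (y + 1)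
  else []
termination_by (x + 1).toNat
decreasing_by omega

def get_antidiag (matrix : List (List Int)) (coord : Int × Int) : List Int :=
  let row_idx := coord.1
  let col_idx := coord.2
  let board_size : Int := matrix.length
  let start_row := row_idx + min (board_size - 1 - row_idx) col_idx
  let start_col := col_idx - min (board_size - 1 - row_idx) col_idx
  pvLoopA matrix board_size start_row start_col

-- ===== PORT B =====
-- the comprehension [row[s - i] for i, row in enumerate(matrix) if 0 <= s - i < n]
-- as a structural recursion over the rows carrying the enumerate counter i
def pvRowsB (s n : Int) : List (List Int) → Int → List Int
  | [], _ => []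
  | row :: rest, i =>
    if 0 ≤ s - i ∧ s - i < n then
      PySem.List.pyGetD row (s - i) 0 :: pvRowsB s n rest (i + 1)
    else pvRowsB s n rest (i + 1)

def get_antidiag_alt (matrix : List (List Int)) (coord : Int × Int) : List Int :=
  let n : Int := matrix.length
  let s := coord.1 + coord.2
  (pvRowsB s n matrix 0).reverse

-- ===== PRECONDITION & SPEC =====
-- Pre_ is exactly where Python A returns: a nonempty matrix whose first row has length n
-- (the square assert), and every row the walk visits is long enough for its access
-- matrix[x][s-x] (A raises IndexError on a visited row shorter than that).
def Pre_get_antidiag (matrix : List (List Int)) (coord : Int × Int) : Prop :=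
  matrix ≠ [] ∧
  (matrix.headD []).length = matrix.length ∧
  ∀ i : Nat, i < matrix.length →
    (max 0 (coord.1 + coord.2 - ((matrix.length : Int) - 1)) ≤ (i : Int) ∧
      (i : Int) ≤ coord.1 + coord.2) →
    coord.1 + coord.2 - (i : Int) < ((matrix.getD i []).length : Int)

instance (matrix : List (List Int)) (coord : Int × Int) : Decidable (Pre_get_antidiag matrix coord) := by
  unfold Pre_get_antidiag; infer_instance

def pvWitness_get_antidiag : List (List Int) × (Int × Int) := ([[1, 2], [3, 4]], (0, 1))

def Spec_get_antidiag (matrix : List (List Int)) (coord : Int × Int) (out : List Int) : Prop := out = get_antidiag_alt matrix coord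
instance (matrix : List (List Int)) (coord : Int × Int) (out : List Int) : Decidable (Spec_get_antidiag matrix coord out) := by unfold Spec_get_antidiag; infer_instance

-- ===== CLAIM (what is proved, stated in full; the proofs are below) =====
def Claim_equal_get_antidiag : Prop := ∀ (matrix : List (List Int)) (coord : Int × Int), Dom_get_antidiag matrix coord → Pre_get_antidiag matrix coord → Spec_get_antidiag matrix coord (get_antidiag matrix coord)

-- ===== LEMMAS AND PROOFS =====

-- B's row pass is the filtered-then-mapped ascending index range.
theorem pvRowsB_eq (s n : Int) :
    ∀ (xs : List (List Int)) (i : Int),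
      pvRowsB s n xs i =
        ((List.range xs.length).filter
            (fun (k : Nat) => decide (0 ≤ s - (i + (k : Int)) ∧ s - (i + (k : Int)) < n))).map
          (fun k => PySem.List.pyGetD (xs.getD k []) (s - (i + (k : Int))) 0) := by
  intro xs
  induction xs with
  | nil => intro i; simp [pvRowsB]
  | cons row rest ih =>
    intro i
    rw [pvRowsB, List.length_cons, List.range_succ_eq_map, List.filter_cons,
      List.filter_map]
    have hcongr :
        ((List.range rest.length).filter
            ((fun (k : Nat) => decide (0 ≤ s - (i + (k : Int)) ∧ s - (i + (k : Int)) < n)) ∘ Nat.succ)).map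
          ((fun k => PySem.List.pyGetD ((row :: rest).getD k []) (s - (i + (k : Int))) 0) ∘ Nat.succ)
        = pvRowsB s n rest (i + 1) := by
      rw [ih (i + 1)]
      apply congrArg₂
      · funext k
        simp only [Function.comp, List.getD_cons_succ]
        congr 1
        push_cast; ring
      · apply List.filter_congr
        intro k _
        simp only [Function.comp, decide_eq_decide]
        push_cast
        constructor <;> (intro hh; constructor <;> omega)
    by_cases h : 0 ≤ s - i ∧ s - i < n
    · rw [if_pos h, if_pos (by simpa using h), List.map_cons, List.map_map]
      simp only [Nat.cast_zero, add_zero, List.getD_cons_zero]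
      rw [hcongr]
    · rw [if_neg h, if_neg (by simpa using h), List.map_map]
      rw [hcongr]

-- reversed, A's walk from x down is the filtered-then-mapped ascending index range up to x.
theorem pvLoopA_rev (matrix : List (List Int)) (n s : Int) :
    ∀ (fuel : Nat) (x : Int), (x + 1).toNat ≤ fuel →
      (pvLoopA matrix n x (s - x)).reverse =
        ((List.range (x + 1).toNat).filter (fun (j : Nat) => decide (s - (j : Int) < n))).map
          (fun j => PySem.List.pyGetD (matrix.getD j []) (s - (j : Int)) 0) := by
  intro fuel
  induction fuel with
  | zero =>
    intro x hx
    rw [pvLoopA, dif_neg (by omega)]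
    have : (x + 1).toNat = 0 := by omega
    simp [this]
  | succ fuel ih =>
    intro x hx
    by_cases h : 0 ≤ x ∧ s - x < n
    · rw [pvLoopA, dif_pos h, List.reverse_cons]
      have hy : s - x + 1 = s - (x - 1) := by ring
      rw [hy, ih (x - 1) (by omega)]
      have h1 : (x - 1 + 1).toNat = x.toNat := by omega
      have h2 : (x + 1).toNat = x.toNat + 1 := by omega
      rw [h1, h2, List.range_succ, List.filter_append, List.map_append]
      have hx' : ((x.toNat : Nat) : Int) = x := by omega
      have : List.filter (fun (j : Nat) => decide (s - (j : Int) < n)) [x.toNat] = [x.toNat] := by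
        simp [hx', h.2]
      rw [this]
      have hconv : PySem.List.pyGetD matrix x [] = matrix.getD x.toNat [] := by
        conv_lhs => rw [← hx']
        rw [PySem.List.pyGetD_natCast]
      simp [hx', hconv, List.getD]
    · rw [pvLoopA, dif_neg h, List.reverse_nil]
      symm
      rw [List.map_eq_nil_iff, List.filter_eq_nil_iff]
      intro j hj
      simp only [List.mem_range] at hj
      simp only [decide_eq_true_eq, not_lt]
      omega

-- the two index sets coincide: below the clamp the 0 <= s - k test is redundant,
-- above it the test fails.
theorem range_filter_bridge {a : Type} (G : Nat → a) (m : Nat) (s n : Int) :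
    ((List.range ((min ((m : Int) - 1) s + 1).toNat)).filter
        (fun (j : Nat) => decide (s - (j : Int) < n))).map G =
      ((List.range m).filter
        (fun (k : Nat) => decide (0 ≤ s - (k : Int) ∧ s - (k : Int) < n))).map G := by
  have ht : (min ((m : Int) - 1) s + 1).toNat ≤ m := by omega
  set t := (min ((m : Int) - 1) s + 1).toNat with htdef
  rw [show m = t + (m - t) by omega, List.range_add, List.filter_append, List.map_append]
  have h2 : ((List.range (m - t)).map (t + ·)).filter
      (fun (k : Nat) => decide (0 ≤ s - (k : Int) ∧ s - (k : Int) < n)) = [] := by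
    rw [List.filter_eq_nil_iff]
    intro k hk
    simp only [List.mem_map, List.mem_range] at hk
    obtain ⟨j, hj, rfl⟩ := hk
    simp only [decide_eq_true_eq, not_and, not_lt]
    intro hge
    exfalso
    omega
  rw [h2, List.map_nil, List.append_nil]
  apply congrArg
  apply List.filter_congr
  intro j hj
  simp only [List.mem_range] at hj
  simp only [decide_eq_decide]
  omega

-- ===== VERDICT (by name: the statement is the Claim_ definition above) =====
theorem get_antidiag_spec : Claim_equal_get_antidiag := by
  unfold Claim_equal_get_antidiag
  intro matrix coord _ _
  unfold Spec_get_antidiag get_antidiag get_antidiag_alt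
  show pvLoopA matrix (matrix.length : Int)
      (coord.1 + min (((matrix.length : Int)) - 1 - coord.1) coord.2)
      (coord.2 - min (((matrix.length : Int)) - 1 - coord.1) coord.2) =
    (pvRowsB (coord.1 + coord.2) (matrix.length : Int) matrix 0).reverse
  set m : Int := (matrix.length : Int) with hm
  set s : Int := coord.1 + coord.2 with hs
  have h1 : coord.1 + min (m - 1 - coord.1) coord.2 = min (m - 1) s := by omega
  have h2 : coord.2 - min (m - 1 - coord.1) coord.2 = s - min (m - 1) s := by omega
  rw [h1, h2]
  have hA := pvLoopA_rev matrix m s (min (m - 1) s + 1).toNat (min (m - 1) s) (le_refl _)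
  have hB := pvRowsB_eq s m matrix 0
  simp only [zero_add] at hB
  rw [← List.reverse_reverse (pvLoopA matrix m (min (m - 1) s) (s - min (m - 1) s)),
    hA, hB]
  apply congrArg
  exact range_filter_bridge (fun j => PySem.List.pyGetD (matrix.getD j []) (s - (j : Int)) 0)
    matrix.length s m
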